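-- pv_equiv track=rewrite | github.com/Umesh-PersonalID/Python_Basics | dict_first_ele.py | majorityFrequencyGroup
-- ===== SOURCE A (Python) =====
-- from collections import Counter
-- import collections
--
-- def majorityFrequencyGroup(s: str) -> str:
--     cache = dict(Counter(s))
--     ram = collections.defaultdict(list)
--     ans = 0
--     count = 0
--     for i,j in cache.items():
--         ram[j].append(i)
--
--     cache = dict(ram)
--     cache =  dict(sorted(cache.items(),reverse = True))
--
--     cache =  dict(sorted(cache.items(),reverse = True, key = lambda item : len(item[1])))
--     res = next(iter(cache))
--     return "".join(cache[res])
-- ===== SOURCE B (Python) =====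
-- def majorityFrequencyGroup(s: str) -> str:
--     cs = list(s)
--     groups = {}
--     for ch in dict.fromkeys(cs):          # distinct chars, first-occurrence order
--         f = cs.count(ch)
--         groups[f] = groups.get(f, []) + [ch]
--     items = iter(groups.items())
--     best_f, best_g = next(items)          # StopIteration on empty input, like A
--     for f, g in items:
--         if len(g) > len(best_g) or (len(g) == len(best_g) and f > best_f):
--             best_f, best_g = f, g
--     return "".join(best_g)
-- ===== Notes on version B (the rewrite author's own statement) =====
-- stated objective: simpler
-- what changed: B builds the freq->chars table from the deduped character list with per-char counts and selects the winner with a single linear argmax scan (larger group, then higher frequency), instead of A's Counter, defaultdict regrouping and two full stable sorts of the table.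
import Mathlib
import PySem

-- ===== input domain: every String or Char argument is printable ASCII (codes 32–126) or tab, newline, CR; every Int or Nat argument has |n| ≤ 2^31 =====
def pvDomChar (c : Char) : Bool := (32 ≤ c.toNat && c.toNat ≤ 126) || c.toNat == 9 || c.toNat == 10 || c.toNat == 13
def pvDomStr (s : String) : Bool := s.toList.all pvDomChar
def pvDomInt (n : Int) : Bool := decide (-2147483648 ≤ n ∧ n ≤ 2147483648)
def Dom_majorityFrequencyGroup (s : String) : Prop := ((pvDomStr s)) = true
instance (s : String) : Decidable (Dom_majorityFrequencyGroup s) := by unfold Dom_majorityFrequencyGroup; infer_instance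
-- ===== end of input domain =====

-- B replaces A's Counter + two full sorts of the frequency table by a dedup+count grouping and a single
-- linear argmax scan over the groups (objective: simpler one-pass selection instead of sort-then-take-first).


-- ===== PORT A =====
def majorityFrequencyGroup (s : String) : String :=
  let cache := PySem.Dict.counter s.toList
  let ram := cache.items.foldl
    (fun (r : PySem.Dict Int (List Char)) p => r.modify p.2 [] (fun l => l ++ [p.1]))
    PySem.Dict.empty
  -- Python's sorted(…, reverse=True) compares the (freq, chars) tuples lexicographically; dict keys are
  -- distinct, so the comparison is decided by the freq component alone — sorting by p.1 is exact here.
  let c1 := PySem.List.sorted ram.items (fun p => p.1) true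
  let c2 := PySem.List.sorted c1 (fun p => (p.2.length : Int)) true
  let cache2 := PySem.Dict.ofList c2
  -- next(iter(cache)) = first key; raises StopIteration on the empty dict, excluded by Pre_
  -- (headD's default is only reached there)
  String.ofList (cache2.getD (cache2.keys.headD 0) [])

-- ===== PORT B =====
def majorityFrequencyGroup_alt (s : String) : String :=
  let cs := s.toList
  let groups := (PySem.List.dedup cs).foldl
    (fun (d : PySem.Dict Int (List Char)) c =>
      d.insert (PySem.List.count cs c : Int) (d.getD (PySem.List.count cs c : Int) [] ++ [c]))
    PySem.Dict.empty
  -- next(items) seeds the scan; raises StopIteration on the empty dict, excluded by Pre_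
  -- (headD's default is only reached there)
  let best := (groups.items.drop 1).foldl
    (fun b p => if b.2.length < p.2.length ∨ (p.2.length = b.2.length ∧ b.1 < p.1) then p else b)
    (groups.items.headD (0, []))
  String.ofList best.2

-- ===== PRECONDITION & SPEC =====
-- Pre_ excludes only the empty string, on which A (and B) raise StopIteration.
def Pre_majorityFrequencyGroup (s : String) : Prop := s ≠ ""
instance (s : String) : Decidable (Pre_majorityFrequencyGroup s) := by unfold Pre_majorityFrequencyGroup; infer_instance
def pvWitness_majorityFrequencyGroup : String := "aabbc"
def Spec_majorityFrequencyGroup (s : String) (out : String) : Prop := out = majorityFrequencyGroup_alt s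
instance (s : String) (out : String) : Decidable (Spec_majorityFrequencyGroup s out) := by unfold Spec_majorityFrequencyGroup; infer_instance

-- ===== CLAIM (what is proved, stated in full; the proofs are below) =====
def Claim_equal_majorityFrequencyGroup : Prop := ∀ (s : String), Dom_majorityFrequencyGroup s → Pre_majorityFrequencyGroup s → Spec_majorityFrequencyGroup s (majorityFrequencyGroup s)

-- ===== LEMMAS AND PROOFS =====

-- strict "better group" order both programs select by: larger group first, then higher frequency
def lexGT (a b : Int × List Char) : Prop :=
  b.2.length < a.2.length ∨ (a.2.length = b.2.length ∧ b.1 < a.1)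

theorem lexGT_trans {a b c : Int × List Char} (h1 : lexGT a b) (h2 : lexGT b c) : lexGT a c := by
  unfold lexGT at *; omega

theorem lexGT_total {a b : Int × List Char} (h : a.1 ≠ b.1) : lexGT a b ∨ lexGT b a := by
  unfold lexGT; by_cases hl : a.2.length = b.2.length <;> omega

-- inserting (reverse, key = group size) into a lexGT-descending list whose members all have strictly
-- larger freq keeps it lexGT-descending
theorem insertBy_lexGT (x : Int × List Char) :
    ∀ (ys : List (Int × List Char)), ys.Pairwise lexGT → (∀ y ∈ ys, x.1 < y.1) →
    (PySem.List.insertBy (fun a b => decide (((b.2.length : Int)) < ((a.2.length : Int)))) x ys).Pairwise lexGT := by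
  intro ys
  induction ys with
  | nil => intro _ _; simp [PySem.List.insertBy, lexGT]
  | cons y t ih =>
    intro hp hf
    rw [List.pairwise_cons] at hp
    obtain ⟨hyt, hpt⟩ := hp
    by_cases hb : ((y.2.length : Int) < (x.2.length : Int))
    · rw [show PySem.List.insertBy (fun a b => decide (((b.2.length : Int)) < ((a.2.length : Int)))) x (y :: t)
          = x :: y :: t by simp [PySem.List.insertBy, hb]]
      refine List.pairwise_cons.mpr ⟨?_, List.pairwise_cons.mpr ⟨hyt, hpt⟩⟩
      intro z hz
      rcases List.mem_cons.mp hz with rfl | hz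
      · exact Or.inl (by exact_mod_cast hb)
      · have := hyt z hz
        unfold lexGT at *; omega
    · rw [show PySem.List.insertBy (fun a b => decide (((b.2.length : Int)) < ((a.2.length : Int)))) x (y :: t)
          = y :: PySem.List.insertBy (fun a b => decide (((b.2.length : Int)) < ((a.2.length : Int)))) x t by
          simp [PySem.List.insertBy, hb]]
      refine List.pairwise_cons.mpr ⟨?_, ih hpt (fun z hz => hf z (List.mem_cons_of_mem _ hz))⟩
      intro z hz
      rcases (PySem.List.mem_insertBy _ _ _ _).mp hz with rfl | hz
      · have hfy := hf y List.mem_cons_self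
        unfold lexGT; omega
      · exact hyt z hz

-- folding a freq-strictly-descending list through the reverse insertion sort yields a lexGT-descending list
theorem foldl_insertBy_lexGT :
    ∀ (l : List (Int × List Char)) (acc : List (Int × List Char)),
    acc.Pairwise lexGT → (∀ y ∈ acc, ∀ x ∈ l, x.1 < y.1) → l.Pairwise (fun a b => b.1 < a.1) →
    (l.foldl (fun acc x => PySem.List.insertBy
        (fun a b => decide (((b.2.length : Int)) < ((a.2.length : Int)))) x acc) acc).Pairwise lexGT := by
  intro l
  induction l with
  | nil => intro acc h _ _; simpa using h
  | cons x t ih =>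
    intro acc hacc hfr hl
    rw [List.pairwise_cons] at hl
    obtain ⟨hxt, hlt⟩ := hl
    simp only [List.foldl_cons]
    apply ih
    · exact insertBy_lexGT x acc hacc (fun y hy => hfr y hy x List.mem_cons_self)
    · intro y hy z hz
      rcases (PySem.List.mem_insertBy _ _ _ _).mp hy with rfl | hy
      · exact hxt z hz
      · exact hfr y hy z (List.mem_cons_of_mem _ hz)
    · exact hlt

-- B's one-pass scan returns an element of the list dominating (w.r.t. lexGT) every element of the list
theorem foldl_argmax :
    ∀ (l : List (Int × List Char)) (b : Int × List Char),
    ((b :: l).map Prod.fst).Nodup →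
    (l.foldl (fun b p => if b.2.length < p.2.length ∨ (p.2.length = b.2.length ∧ b.1 < p.1) then p else b) b)
      ∈ b :: l ∧
    ∀ y ∈ b :: l, y = (l.foldl (fun b p => if b.2.length < p.2.length ∨ (p.2.length = b.2.length ∧ b.1 < p.1) then p else b) b)
      ∨ lexGT (l.foldl (fun b p => if b.2.length < p.2.length ∨ (p.2.length = b.2.length ∧ b.1 < p.1) then p else b) b) y := by
  intro l
  induction l with
  | nil => intro b _; simp
  | cons p t ih =>
    intro b hnd
    have hbp : b.1 ≠ p.1 := by
      simp only [List.map_cons, List.nodup_cons] at hnd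
      intro he; exact hnd.1 (by simp [he])
    have hswap : ∀ c : Int × List Char, c = b ∨ c = p →
        ((c :: t).map Prod.fst).Nodup := by
      rintro c (rfl | rfl) <;>
      · simp only [List.map_cons, List.nodup_cons, List.mem_cons] at hnd ⊢
        constructor
        · intro hm
          first
            | exact hnd.1 (Or.inr hm)
            | exact hnd.2.1 hm
        · exact hnd.2.2
    simp only [List.foldl_cons]
    by_cases hc : (b.2.length < p.2.length ∨ (p.2.length = b.2.length ∧ b.1 < p.1))
    · rw [if_pos hc]
      have hlex : lexGT p b := hc
      obtain ⟨hm, hdom⟩ := ih p (hswap p (Or.inr rfl))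
      refine ⟨List.mem_cons_of_mem _ hm, ?_⟩
      intro y hy
      rcases List.mem_cons.mp hy with rfl | hy
      · rcases hdom p List.mem_cons_self with heq | hgt
        · exact Or.inr (heq ▸ hlex)
        · exact Or.inr (lexGT_trans hgt hlex)
      · exact hdom y hy
    · rw [if_neg hc]
      have hnlex : ¬ lexGT p b := hc
      obtain ⟨hm, hdom⟩ := ih b (hswap b (Or.inl rfl))
      constructor
      · rcases List.mem_cons.mp hm with he | hm
        · rw [he]; exact List.mem_cons_self
        · exact List.mem_cons_of_mem _ (List.mem_cons_of_mem _ hm)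
      · intro y hy
        rcases List.mem_cons.mp hy with rfl | hy
        · exact hdom y List.mem_cons_self
        rcases List.mem_cons.mp hy with rfl | hy
        · have hgtbp : lexGT b y := (lexGT_total (Ne.symm hbp)).resolve_left hnlex
          rcases hdom b List.mem_cons_self with heq | hgt
          · exact Or.inr (heq ▸ hgtbp)
          · exact Or.inr (lexGT_trans hgt hgtbp)
        · exact hdom y (List.mem_cons_of_mem _ hy)

-- a fold of inserts keeps the key list nodup
theorem nodup_keys_foldl_insert {ν : Type} (k : Char → Int) (v : PySem.Dict Int ν → Char → ν) :
    ∀ (l : List Char) (d : PySem.Dict Int ν), d.keys.Nodup →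
    (l.foldl (fun d c => d.insert (k c) (v d c)) d).keys.Nodup := by
  intro l
  induction l with
  | nil => intro d h; exact h
  | cons c t ih => intro d h; exact ih _ (PySem.Dict.nodup_keys_insert d (k c) (v d c) h)

-- the two grouping dicts are the same dict
theorem groups_eq (cs : List Char) :
    (PySem.Dict.counter cs).items.foldl
      (fun (r : PySem.Dict Int (List Char)) p => r.modify p.2 [] (fun l => l ++ [p.1]))
      PySem.Dict.empty
    = (PySem.List.dedup cs).foldl
      (fun (d : PySem.Dict Int (List Char)) c =>
        d.insert (PySem.List.count cs c : Int) (d.getD (PySem.List.count cs c : Int) [] ++ [c]))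
      PySem.Dict.empty := by
  rw [PySem.Dict.items_counter, List.foldl_map, PySem.List.dedup_eq_ofList]
  rfl

-- the head of A's doubly-sorted table is exactly B's one-pass argmax
theorem core_select (ps : List (Int × List Char)) (hnd : (ps.map Prod.fst).Nodup) :
    String.ofList ((PySem.Dict.ofList (PySem.List.sorted
        (PySem.List.sorted ps (fun p => p.1) true) (fun p => (p.2.length : Int)) true)).getD
      ((PySem.Dict.ofList (PySem.List.sorted
        (PySem.List.sorted ps (fun p => p.1) true) (fun p => (p.2.length : Int)) true)).keys.headD 0) [])
    = String.ofList ((ps.drop 1).foldl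
        (fun b p => if b.2.length < p.2.length ∨ (p.2.length = b.2.length ∧ b.1 < p.1) then p else b)
        (ps.headD (0, []))).2 := by
  rcases ps with _ | ⟨p0, rest⟩
  · rfl
  · have hperm1 : (PySem.List.sorted (p0 :: rest) (fun p => p.1) true).Perm (p0 :: rest) :=
      PySem.List.sorted_perm _ _ _
    have hnd1 : ((PySem.List.sorted (p0 :: rest) (fun p => p.1) true).map Prod.fst).Nodup :=
      ((hperm1.map Prod.fst).nodup_iff).mpr hnd
    have hp1 : (PySem.List.sorted (p0 :: rest) (fun p => p.1) true).Pairwise (fun a b => b.1 < a.1) := by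
      have hle := PySem.List.sorted_pairwise_rev (p0 :: rest) (fun p : Int × List Char => p.1)
      have hne : (PySem.List.sorted (p0 :: rest) (fun p => p.1) true).Pairwise
          (fun a b : Int × List Char => a.1 ≠ b.1) := List.pairwise_map.mp hnd1
      exact (hle.and hne).imp (fun h => lt_of_le_of_ne h.1 h.2.symm)
    have hp2 : (PySem.List.sorted (PySem.List.sorted (p0 :: rest) (fun p => p.1) true)
        (fun p => (p.2.length : Int)) true).Pairwise lexGT := by
      rw [PySem.List.sorted_rev_eq_foldl_insertBy]
      exact foldl_insertBy_lexGT _ [] (by simp) (by simp) hp1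
    have hperm2 : (PySem.List.sorted (PySem.List.sorted (p0 :: rest) (fun p => p.1) true)
        (fun p => (p.2.length : Int)) true).Perm (p0 :: rest) :=
      (PySem.List.sorted_perm _ _ _).trans hperm1
    rcases hc2e : PySem.List.sorted (PySem.List.sorted (p0 :: rest) (fun p => p.1) true)
        (fun p => (p.2.length : Int)) true with _ | ⟨h, t⟩
    · have := hperm2.length_eq; rw [hc2e] at this; simp at this
    · rw [hc2e] at hp2 hperm2
      have hnd2 : ((h :: t).map Prod.fst).Nodup := ((hperm2.map Prod.fst).nodup_iff).mpr hnd
      have hitems : (PySem.Dict.ofList (h :: t)).items = h :: t := by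
        have hfr := PySem.Dict.items_foldl_insert_fresh (h :: t) Prod.fst Prod.snd PySem.Dict.empty
          (fun a _ => PySem.Dict.contains_empty _) hnd2
        simpa using hfr
      have hkeys : (PySem.Dict.ofList (h :: t)).keys = (h :: t).map Prod.fst := by
        rw [show (PySem.Dict.ofList (h :: t)).keys = (PySem.Dict.ofList (h :: t)).items.map Prod.fst from rfl,
          hitems]
      have hgetD : (PySem.Dict.ofList (h :: t)).getD h.1 [] = h.2 := by
        apply PySem.Dict.getD_of_mem_items
        · rw [hitems]; exact (by simp : (h.1, h.2) ∈ h :: t)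
        · rw [hkeys]; exact hnd2
      have hdomA : ∀ y ∈ p0 :: rest, y = h ∨ lexGT h y := by
        intro y hy
        rcases List.mem_cons.mp (hperm2.symm.subset hy) with rfl | hy'
        · exact Or.inl rfl
        · exact Or.inr (List.rel_of_pairwise_cons hp2 hy')
      obtain ⟨hmB, hdomB⟩ := foldl_argmax rest p0 hnd
      have hh : h ∈ p0 :: rest := hperm2.subset List.mem_cons_self
      have heq : (rest.foldl
          (fun b p => if b.2.length < p.2.length ∨ (p.2.length = b.2.length ∧ b.1 < p.1) then p else b) p0) = h := by
        rcases hdomB h hh with he | hgt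
        · exact he.symm
        · rcases hdomA _ hmB with he | hgt2
          · exact he
          · exact absurd hgt (by unfold lexGT at *; omega)
      rw [hkeys]
      simp only [List.map_cons, List.headD_cons, List.drop_succ_cons, List.drop_zero]
      rw [hgetD, heq]

-- ===== VERDICT (by name: the statement is the Claim_ definition above) =====
theorem majorityFrequencyGroup_spec : Claim_equal_majorityFrequencyGroup := by
  intro s _ _
  unfold Spec_majorityFrequencyGroup majorityFrequencyGroup majorityFrequencyGroup_alt
  simp only []
  rw [groups_eq s.toList]
  set G := (PySem.List.dedup s.toList).foldl
    (fun (d : PySem.Dict Int (List Char)) c =>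
      d.insert (PySem.List.count s.toList c : Int) (d.getD (PySem.List.count s.toList c : Int) [] ++ [c]))
    PySem.Dict.empty with hG
  have hnd : G.keys.Nodup := by
    rw [hG]
    exact nodup_keys_foldl_insert _ _ _ _ (by rw [PySem.Dict.keys_empty]; exact List.nodup_nil)
  rcases hps : G.items with _ | ⟨p0, rest⟩
  · rfl
  · have hndps : ((p0 :: rest).map Prod.fst).Nodup := by
      have hk : G.keys = (p0 :: rest).map Prod.fst := by
        rw [show G.keys = G.items.map Prod.fst from rfl, hps]
      rwa [hk] at hnd
    exact core_select (p0 :: rest) hndps
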